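-- pv_equiv track=rewrite | github.com/misken/pymwts | pymwts/pymwtsio/infiles/mwts_inputs_example/mwts_makedat.py | num_half_weekends
-- ===== SOURCE A (Python) =====
-- def num_half_weekends(x,wkendtype):
--     """
--     Returns number of half weekends (one day) worked in a given weekends worked pattern.
--
--     Inputs:
--           x - list of 2-tuples representing weekend days worked. Each list
--             element is one week. The tuple of binary values represent the
--             first and second day of the weekend for that week. A 1 means
--             the day is worked, a 0 means it is off.
--
--           wkendtype - 1 --> weekend consists of Saturday and Sunday
--                  2 --> weekend consists of Friday and Saturday
--
--     Output:
--         Number of half weekends worked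
--
--     Example:
--         n = num_half_weekends([(0,1),(1,0),(0,1),(1,0)],1)
--         # n = 0
--
--         n = num_half_weekends([(0,1),(1,0),(0,1),(0,0)],1)
--         # n = 1
--
--         n = num_half_weekends([(1,1),(1,0),(1,1),(1,0)],2)
--         # n = 2
--
--         n = num_half_weekends([(0,1),(1,0),(0,1),(0,0)],2)
--         # n = 3
--
--     """
--     if wkendtype == 2:
--         L1 = [sum(j) for j in x]
--         n = sum([(1 if j == 1 else 0) for j in L1])
--     else:
--         n = 0
--         for j in range(len(x)):
--             if j < len(x) - 1:
--                 if x[j][1] + x[j+1][0] == 1: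
--                     n += 1
--             else:
--                 if x[j][1] + x[0][0] == 1:
--                     n += 1
--
--     return n
-- ===== SOURCE B (Python) =====
-- def _count_lone(xs):
--     if not xs:
--         return 0
--     a, b = xs[0]
--     return (1 if a + b == 1 else 0) + _count_lone(xs[1:])
--
-- def _count_chain(first, xs):
--     if len(xs) == 1:
--         return 1 if xs[0][1] + first[0] == 1 else 0
--     return (1 if xs[0][1] + xs[1][0] == 1 else 0) + _count_chain(first, xs[1:])
--
-- def num_half_weekends(x, wkendtype):
--     if wkendtype == 2:
--         return _count_lone(x)
--     if not x:
--         return 0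
--     return _count_chain(x[0], x)
-- ===== Notes on version B (the rewrite author's own statement) =====
-- stated objective: alternative
-- what changed: Replaces A's indexed loop with a last-element special case (and the type-2 two-stage sum-then-count comprehensions) by index-free structural recursion: _count_chain walks the list pairing each week's tail day with the head day of the next week while threading the first week down for the final wrap-around, and _count_lone recurses over weeks for type 2.
import Mathlib
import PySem

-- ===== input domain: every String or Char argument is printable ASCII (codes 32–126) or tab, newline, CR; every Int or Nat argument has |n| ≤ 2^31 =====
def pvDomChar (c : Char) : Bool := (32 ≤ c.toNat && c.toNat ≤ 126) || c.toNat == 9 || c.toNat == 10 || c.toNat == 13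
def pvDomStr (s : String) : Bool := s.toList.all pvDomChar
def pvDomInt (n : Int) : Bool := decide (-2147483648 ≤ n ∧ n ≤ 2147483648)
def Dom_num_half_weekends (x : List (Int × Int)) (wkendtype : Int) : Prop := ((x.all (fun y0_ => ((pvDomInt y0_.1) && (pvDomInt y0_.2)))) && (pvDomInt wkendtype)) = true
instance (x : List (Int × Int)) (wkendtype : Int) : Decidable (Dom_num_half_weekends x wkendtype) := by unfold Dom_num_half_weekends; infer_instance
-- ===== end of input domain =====

-- B replaces A's indexed loop with last-index special case (and the type-2 staged comprehensions)
-- by index-free structural recursion that threads the first week down for the wrap-around: alternative decomposition.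

-- ===== PORT A =====
def num_half_weekends (x : List (Int × Int)) (wkendtype : Int) : Int :=
  if wkendtype == 2 then
    let L1 := x.map (fun j => j.1 + j.2)
    (L1.map (fun j => if j == 1 then (1 : Int) else 0)).sum
  else
    (List.range x.length).foldl (fun n j =>
      if j < x.length - 1 then
        if (x.getD j (0, 0)).2 + (x.getD (j + 1) (0, 0)).1 == 1 then n + 1 else n
      else
        if (x.getD j (0, 0)).2 + (x.getD 0 (0, 0)).1 == 1 then n + 1 else n) 0

-- ===== PORT B =====
def countLone : List (Int × Int) → Int
  | [] => 0
  | (a, b) :: t => (if a + b == 1 then (1 : Int) else 0) + countLone t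

def countChain (first : Int × Int) : List (Int × Int) → Int
  | [] => 0
  | [a] => if a.2 + first.1 == 1 then 1 else 0
  | a :: b :: t => (if a.2 + b.1 == 1 then (1 : Int) else 0) + countChain first (b :: t)

def num_half_weekends_alt (x : List (Int × Int)) (wkendtype : Int) : Int :=
  if wkendtype == 2 then countLone x
  else
    match x with
    | [] => 0
    | h :: t => countChain h (h :: t)

-- ===== PRECONDITION & SPEC =====
def Spec_num_half_weekends (x : List (Int × Int)) (wkendtype : Int) (out : Int) : Prop := out = num_half_weekends_alt x wkendtype
instance (x : List (Int × Int)) (wkendtype : Int) (out : Int) : Decidable (Spec_num_half_weekends x wkendtype out) := by unfold Spec_num_half_weekends; infer_instance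

-- ===== CLAIM (what is proved, stated in full; the proofs are below) =====
def Claim_equal_num_half_weekends : Prop := ∀ (x : List (Int × Int)) (wkendtype : Int), Dom_num_half_weekends x wkendtype → Spec_num_half_weekends x wkendtype (num_half_weekends x wkendtype)

-- ===== LEMMAS AND PROOFS =====

-- A's type-2 branch (sum of indicator map over sums) equals B's recursive countLone
theorem sum_map_eq_countLone (x : List (Int × Int)) :
    ((x.map (fun j => j.1 + j.2)).map (fun j => if j == 1 then (1 : Int) else 0)).sum
      = countLone x := by
  induction x with
  | nil => simp [countLone]
  | cons a t ih =>
    cases a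
    rw [List.map_map] at ih
    simp [Function.comp_def] at ih
    simp [countLone, Function.comp_def, ih]

-- counting by a foldl accumulator equals countP (shape of A's else-branch loop)
theorem foldl_count_eq {α : Type} (l : List α) (f : α → Bool) (n : Int) :
    l.foldl (fun n j => if f j then n + 1 else n) n = n + (l.countP f : Nat) := by
  induction l generalizing n with
  | nil => simp
  | cons a t ih =>
    simp only [List.foldl_cons, List.countP_cons, ih]
    by_cases h : f a <;> simp [h] <;> push_cast <;> ring

-- countP over indices via getD equals countP over the list itself
theorem countP_range_getD {α : Type} (l : List α) (d : α) (q : α → Bool) :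
    (List.range l.length).countP (fun j => q (l.getD j d)) = l.countP q := by
  induction l with
  | nil => simp
  | cons a t ih =>
    rw [List.length_cons, List.range_succ_eq_map]
    simp only [List.countP_cons, List.countP_map, List.getD_cons_zero, Function.comp_def,
      List.getD_cons_succ]
    rw [ih]

-- B's chain walk counts q over the zip of the list with its successor-rotated copy
theorem countChain_eq_countP (first : Int × Int) (a : Int × Int) (t : List (Int × Int)) :
    countChain first (a :: t)
      = (((a :: t).zip (t ++ [first])).countP (fun p => p.1.2 + p.2.1 == 1) : Nat) := by
  induction t generalizing a with
  | nil => by_cases h : a.2 + first.1 == 1 <;> simp [countChain, List.countP_cons, h]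
  | cons b t' ih =>
    rw [show countChain first (a :: b :: t')
        = (if a.2 + b.1 == 1 then (1 : Int) else 0) + countChain first (b :: t') from rfl, ih b]
    simp only [List.cons_append, List.zip_cons_cons, List.countP_cons]
    by_cases h : a.2 + b.1 == 1 <;> simp [h] <;> push_cast <;> ring

theorem num_half_weekends_spec : Claim_equal_num_half_weekends := by
  intro x wkendtype _
  unfold Spec_num_half_weekends num_half_weekends num_half_weekends_alt
  by_cases hw : wkendtype == 2
  · simp only [hw, if_pos]
    exact sum_map_eq_countLone x
  · simp only [hw, Bool.false_eq_true, if_false]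
    cases x with
    | nil => simp
    | cons h t =>
      have hcongr :
          (List.range (h :: t).length).foldl (fun (n : Int) (j : Nat) =>
            if j < (h :: t).length - 1 then
              if ((h :: t).getD j (0, 0)).2 + ((h :: t).getD (j + 1) (0, 0)).1 == 1 then n + 1 else n
            else
              if ((h :: t).getD j (0, 0)).2 + ((h :: t).getD 0 (0, 0)).1 == 1 then n + 1 else n) (0 : Int)
        = (List.range (h :: t).length).foldl (fun (n : Int) (j : Nat) =>
            if (((h :: t).zip (t ++ [h])).getD j ((0,0),(0,0))).1.2
                + (((h :: t).zip (t ++ [h])).getD j ((0,0),(0,0))).2.1 == 1 then n + 1 else n) (0 : Int) := by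
        apply PySem.List.foldl_congr_mem
        intro n j hjmem
        have hj : j < (h :: t).length := List.mem_range.mp hjmem
        have hz : ((h :: t).zip (t ++ [h])).getD j ((0,0),(0,0))
            = ((h :: t).getD j (0,0), (t ++ [h]).getD j (0,0)) := by
          rw [List.getD_eq_getElem _ _ (by simp at hj ⊢; omega),
            List.getD_eq_getElem _ _ hj,
            List.getD_eq_getElem _ _ (by simp at hj ⊢; omega), List.getElem_zip]
        by_cases hlast : j < (h :: t).length - 1
        · have hjt : j < t.length := by simp at hlast ⊢; omega
          have hrot : (t ++ [h]).getD j (0,0) = (h :: t).getD (j + 1) (0,0) := by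
            rw [List.getD_eq_getElem _ _ (by simp; omega),
              List.getD_eq_getElem _ _ (by simp; omega)]
            simp [List.getElem_append_left hjt]
          rw [if_pos hlast, hz, hrot]
        · have hjt : j = t.length := by simp at hj hlast; omega
          have hrot : (t ++ [h]).getD j (0,0) = h := by
            rw [List.getD_eq_getElem _ _ (by simp; omega)]
            subst hjt
            simp
          rw [if_neg hlast, hz, hrot]
          rfl
      rw [hcongr, foldl_count_eq, zero_add]
      change _ = countChain h (h :: t)
      rw [countChain_eq_countP h h t]
      have hc := countP_range_getD ((h :: t).zip (t ++ [h])) ((0,0),(0,0))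
        (fun p => p.1.2 + p.2.1 == 1)
      have hlen : ((h :: t).zip (t ++ [h])).length = (h :: t).length := by simp
      rw [← hc, hlen]
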